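-- pv_equiv track=rewrite | github.com/JuliaChernykh/ChatBot | Bot/exc6.py | algorithm_1
-- ===== SOURCE A (Python) =====
-- def number_of_1(number):
--     count_of_1 = 0
--     while number != 0:
--         if number % 2 == 1:
--             count_of_1 += 1
--         number //= 10
--     return count_of_1
--
-- def algorithm_1(N):
--     for i in range(2):
--         curr = number_of_1(N)
--         if curr % 2 == 0:
--             N *= 10
--         else:
--             N = N*10 + 1
--     return N
-- ===== SOURCE B (Python) =====
-- def algorithm_1(N):
--     # Stage 1: materialize the decimal digits of N as a list.
--     n, digits = N, []
--     while n != 0: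
--         digits.append(n % 10)
--         n //= 10
--     # Stage 2: parity of the number of odd digits; after one append the count
--     # is even, so both appends collapse to a branch-free closed form.
--     parity = len([d for d in digits if d % 2 == 1]) % 2
--     return N * 100 + 10 * parity
-- ===== Notes on version B (the rewrite author's own statement) =====
-- stated objective: simpler
-- what changed: Instead of running A's fused count-and-append loop twice, B builds the decimal digit list once, counts odd digits with a filter, and returns the branch-free closed form N*100 + 10*(count%2) (after the first append the odd-digit count is even, so the second append is always a 0).
import Mathlib
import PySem

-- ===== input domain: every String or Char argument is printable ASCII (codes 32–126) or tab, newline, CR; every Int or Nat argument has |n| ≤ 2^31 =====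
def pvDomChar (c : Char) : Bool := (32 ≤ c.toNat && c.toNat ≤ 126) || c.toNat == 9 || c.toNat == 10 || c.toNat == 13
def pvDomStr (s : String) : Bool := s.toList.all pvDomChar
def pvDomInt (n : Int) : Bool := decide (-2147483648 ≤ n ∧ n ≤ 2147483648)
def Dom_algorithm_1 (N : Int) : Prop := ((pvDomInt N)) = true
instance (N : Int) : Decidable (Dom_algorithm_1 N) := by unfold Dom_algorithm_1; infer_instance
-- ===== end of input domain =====

-- B replaces A's twice-run fused count-and-append loop by staged passes: build the digit
-- list once, count odd digits with a filter, return the branch-free closed form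
-- N*100 + 10*(count % 2); objective: simpler.

-- ===== PORT A =====
-- Python's while loop never terminates for negative input (number //= 10 stalls at -1);
-- the guard 'number ≤ 0' makes the Lean recursion total; Pre_ restricts the claim to 0 ≤ N.
def numberOf1 (number : Int) : Int :=
  if number ≤ 0 then 0
  else (if PySem.Int.mod number 2 = 1 then 1 else 0) + numberOf1 (PySem.Int.floordiv number 10)
termination_by number.toNat
decreasing_by
  have h10 : PySem.Int.floordiv number 10 = number / 10 :=
    PySem.Int.floordiv_eq_ediv_of_pos (by omega)
  rw [h10]; omega

def algorithm_1 (N : Int) : Int :=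
  (List.range 2).foldl (fun N _ =>
    let curr := numberOf1 N
    if PySem.Int.mod curr 2 = 0 then N * 10 else N * 10 + 1) N

-- ===== PORT B =====
-- Stage 1 of B: the decimal digit list (Python while loop; same divergence on
-- negatives in Python, guarded here to make the recursion total).
def pyDigits (n : Int) : List Int :=
  if n ≤ 0 then []
  else PySem.Int.mod n 10 :: pyDigits (PySem.Int.floordiv n 10)
termination_by n.toNat
decreasing_by
  have h10 : PySem.Int.floordiv n 10 = n / 10 :=
    PySem.Int.floordiv_eq_ediv_of_pos (by omega)
  rw [h10]; omega

def algorithm_1_alt (N : Int) : Int :=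
  let parity := PySem.Int.mod
    (((pyDigits N).filter (fun d => PySem.Int.mod d 2 = 1)).length : Int) 2
  N * 100 + 10 * parity

-- ===== PRECONDITION & SPEC =====
-- Pre_ excludes N < 0: there A's while loop (number //= 10 stalls at -1) never terminates.
def Pre_algorithm_1 (N : Int) : Prop := 0 ≤ N
instance (N : Int) : Decidable (Pre_algorithm_1 N) := by unfold Pre_algorithm_1; infer_instance
def pvWitness_algorithm_1 : Int := 35

def Spec_algorithm_1 (N : Int) (out : Int) : Prop := out = algorithm_1_alt N
instance (N : Int) (out : Int) : Decidable (Spec_algorithm_1 N out) := by unfold Spec_algorithm_1; infer_instance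

-- ===== CLAIM (what is proved, stated in full; the proofs are below) =====
def Claim_equal_algorithm_1 : Prop := ∀ (N : Int), Dom_algorithm_1 N → Pre_algorithm_1 N → Spec_algorithm_1 N (algorithm_1 N)

-- ===== LEMMAS AND PROOFS =====

theorem mod2_of (n : Int) : PySem.Int.mod n 2 = n % 2 :=
  PySem.Int.mod_eq_emod_of_pos (by omega)

-- A's fused counter equals B's filtered digit count.
theorem numberOf1_eq_count (n : Int) :
    numberOf1 n = (((pyDigits n).filter (fun d => PySem.Int.mod d 2 = 1)).length : Int) := by
  fun_induction numberOf1 n with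
  | case1 n h => rw [pyDigits]; simp [h]
  | case2 n h ih =>
      rw [pyDigits]; rw [if_neg h]
      have hmod : PySem.Int.mod (PySem.Int.mod n 10) 2 = PySem.Int.mod n 2 := by
        rw [mod2_of, mod2_of, PySem.Int.mod_eq_emod_of_pos (a := n) (by omega)]
        omega
      rw [List.filter_cons]
      by_cases hm : PySem.Int.mod n 2 = 1
      · rw [if_pos hm, if_pos (by simp only [decide_eq_true_eq]; rw [hmod]; exact hm)]
        rw [ih]; push_cast [List.length_cons]; ring
      · rw [if_neg hm, if_neg (by simp only [decide_eq_true_eq]; rw [hmod]; exact hm)]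
        rw [zero_add, ih]

-- appending a 0 keeps the odd-digit count (0 ≤ N)
theorem count_mul10 (N : Int) (h : 0 ≤ N) : numberOf1 (N * 10) = numberOf1 N := by
  rcases eq_or_lt_of_le h with h0 | hpos
  · rw [← h0]; norm_num
  · rw [numberOf1]
    have hne : ¬ N * 10 ≤ 0 := by nlinarith
    rw [if_neg hne]
    have hd : PySem.Int.floordiv (N * 10) 10 = N := by
      rw [PySem.Int.floordiv_eq_ediv_of_pos (by omega)]
      omega
    have hm : PySem.Int.mod (N * 10) 2 = 0 := by rw [mod2_of]; omega
    rw [hd, hm]; simp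

-- appending a 1 increments the odd-digit count (0 ≤ N)
theorem count_mul10_add1 (N : Int) (h : 0 ≤ N) :
    numberOf1 (N * 10 + 1) = numberOf1 N + 1 := by
  rw [numberOf1]
  have hne : ¬ N * 10 + 1 ≤ 0 := by nlinarith
  rw [if_neg hne]
  have hd : PySem.Int.floordiv (N * 10 + 1) 10 = N := by
    rw [PySem.Int.floordiv_eq_ediv_of_pos (by omega)]
    omega
  have hm : PySem.Int.mod (N * 10 + 1) 2 = 1 := by rw [mod2_of]; omega
  rw [hd, hm]; simp [Int.add_comm]

-- ===== VERDICT (by name: the statement is the Claim_ definition above) =====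
theorem algorithm_1_spec : Claim_equal_algorithm_1 := by
  intro N _ hpre
  unfold Spec_algorithm_1 algorithm_1 algorithm_1_alt
  simp only [List.range_succ, List.range_zero, List.nil_append, List.foldl_append,
    List.foldl_cons, List.foldl_nil]
  rw [← numberOf1_eq_count]
  by_cases hc : PySem.Int.mod (numberOf1 N) 2 = 0
  · rw [if_pos hc]
    rw [count_mul10 N hpre, if_pos hc, hc]; ring
  · rw [if_neg hc]
    rw [count_mul10_add1 N hpre]
    have hm : PySem.Int.mod (numberOf1 N + 1) 2 = 0 := by
      rw [mod2_of] at *; omega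
    have h1 : PySem.Int.mod (numberOf1 N) 2 = 1 := by
      have hnn : 0 ≤ numberOf1 N := by
        rw [numberOf1_eq_count]; positivity
      rw [mod2_of] at *; omega
    rw [if_pos hm, h1]; ring
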